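-- pv_equiv track=rewrite | github.com/WPSemantix/langchain-timbr | src/langchain_timbr/utils/memory.py | _format_history_for_classifier
-- ===== SOURCE A (Python) =====
-- from typing import Any, Dict, List, Optional, Union
--
-- def _walk_parent_chain(
--     msg_id: str,
--     id_map: Dict[str, Dict[str, Any]],
-- ) -> List[Dict[str, Any]]:
--     """Walk ``parent_query_id`` links from *msg_id* back to root.
--
--     Returns a chronological list (root first) of ancestor messages,
--     **excluding** *msg_id* itself.  The API guarantees complete chains, so
--     missing parents should not occur; a ``seen`` set is kept defensively to
--     prevent infinite loops if data is malformed.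
--     """
--     ancestors: list[Dict[str, Any]] = []
--     seen: set[str] = {msg_id}
--     current_id = msg_id
--
--     while True:
--         current = id_map.get(current_id)
--         if current is None:
--             break
--         parent_id = current.get("parent_query_id")
--         if not parent_id or parent_id in seen:
--             break
--         parent = id_map.get(parent_id)
--         if parent is None:
--             break
--         seen.add(parent_id)
--         ancestors.append(parent)
--         current_id = parent_id
--
--     ancestors.reverse()  # chronological: root first
--     return ancestors
--
-- def _format_history_for_classifier(
--     messages: List[Dict[str, Any]],
--     id_map: Dict[str, Dict[str, Any]],
-- ) -> tuple:
--     """Build a chronological Q&A block for the classifier prompt.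
--
--     Walks each message's parent chain via *id_map* so the classifier sees
--     full follow-up threads, then deduplicates messages that appear in
--     multiple chains.
--
--     Returns a tuple of (formatted_text, seq_to_guid) where seq_to_guid maps
--     sequential number strings ("1", "2", ...) to actual message_id GUIDs.
--     """
--     seen: set[str] = set()
--     ordered_ids: list[str] = []
--     ordered_entries: list[Dict[str, Any]] = []
--
--     for msg in messages:
--         mid = msg.get("message_id", "")
--         # Expand ancestor chain for this message
--         for ancestor in _walk_parent_chain(mid, id_map):
--             aid = ancestor.get("message_id", "")
--             if aid and aid not in seen:
--                 seen.add(aid)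
--                 ordered_ids.append(aid)
--                 ordered_entries.append(ancestor)
--         if mid and mid not in seen:
--             seen.add(mid)
--             ordered_ids.append(mid)
--             ordered_entries.append(msg)
--
--     # Assign sequential numbers (1-based) in chronological order
--     seq_to_guid: Dict[str, str] = {}
--     lines: list[str] = []
--     for idx, (guid, entry) in enumerate(zip(ordered_ids, ordered_entries), start=1):
--         seq_id = str(idx)
--         seq_to_guid[seq_id] = guid
--         lines.append(
--             f"[{seq_id}] Q: {entry.get('question', '')}\n"
--             f"A: {entry.get('answer', '')}"
--         )
--
--     return "\n---\n".join(lines), seq_to_guid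
-- ===== SOURCE B (Python) =====
-- def _format_history_for_classifier(messages, id_map):
--     """Memoized-recursive rewrite: one insertion-ordered dict serves as both the
--     dedup set and the ordered (guid -> entry) output; ancestors are emitted
--     root-first by recursing on the parent before emitting the current entry."""
--     ordered = {}
--
--     def visit(cid, entry, seen):
--         node = id_map.get(cid)
--         if node is not None:
--             pid = node.get("parent_query_id", "")
--             if pid and pid not in seen:
--                 parent = id_map.get(pid)
--                 if parent is not None:
--                     visit(pid, parent, seen | {pid})
--         g = entry.get("message_id", "")
--         if g and g not in ordered:
--             ordered[g] = entry
--
--     for msg in messages: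
--         mid = msg.get("message_id", "")
--         visit(mid, msg, {mid})
--
--     seq_to_guid = {}
--     lines = []
--     for idx, (guid, entry) in enumerate(ordered.items(), start=1):
--         seq_to_guid[str(idx)] = guid
--         lines.append(
--             f"[{idx}] Q: {entry.get('question', '')}\n"
--             f"A: {entry.get('answer', '')}"
--         )
--     return "\n---\n".join(lines), seq_to_guid
-- ===== Notes on version B (the rewrite author's own statement) =====
-- stated objective: alternative
-- what changed: Replaces the iterative walk-collect-reverse helper plus three parallel dedup structures (seen set, ordered_ids, ordered_entries) with a recursive visit that recurses on the parent first so ancestors are emitted root-first without any reverse, and a single insertion-ordered dict that serves as both the seen set and the ordered (guid, entry) output.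
import Mathlib
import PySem

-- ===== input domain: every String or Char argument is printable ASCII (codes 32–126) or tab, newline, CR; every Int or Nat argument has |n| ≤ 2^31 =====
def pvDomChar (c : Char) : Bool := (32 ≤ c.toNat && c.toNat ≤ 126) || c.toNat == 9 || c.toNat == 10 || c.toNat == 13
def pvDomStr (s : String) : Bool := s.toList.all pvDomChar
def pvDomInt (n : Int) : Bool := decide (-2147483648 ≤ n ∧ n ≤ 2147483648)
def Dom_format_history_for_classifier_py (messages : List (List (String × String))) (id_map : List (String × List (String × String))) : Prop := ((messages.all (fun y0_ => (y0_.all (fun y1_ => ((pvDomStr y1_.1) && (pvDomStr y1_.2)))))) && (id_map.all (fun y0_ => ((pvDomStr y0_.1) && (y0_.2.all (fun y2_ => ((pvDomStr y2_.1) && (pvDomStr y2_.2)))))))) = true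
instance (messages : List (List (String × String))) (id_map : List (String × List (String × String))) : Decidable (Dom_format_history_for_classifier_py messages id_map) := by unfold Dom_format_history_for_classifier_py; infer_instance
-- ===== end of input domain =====

-- B replaces A's walk-collect-reverse helper and its three parallel dedup structures
-- (seen set, ordered_ids, ordered_entries) with a parent-first recursion emitting into one
-- insertion-ordered dict (alternative decomposition, same cost); return values proved equal.

-- ===== PORT A =====
-- _walk_parent_chain's while-loop; the fuel (id_map.length + 1) only makes the loop total:
-- each iteration adds a fresh key of id_map to `seen`, so it is never exhausted.
def pvWalkAux (id_map : List (String × List (String × String))) :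
    Nat → List (List (String × String)) → PySem.Set String → String → List (List (String × String))
  | 0, ancestors, _, _ => ancestors
  | fuel+1, ancestors, seen, current_id =>
    match PySem.Dict.get? (PySem.Dict.mk id_map) current_id with
    | none => ancestors
    | some current =>
      let parent_id := PySem.Dict.getD (PySem.Dict.mk current) "parent_query_id" ""
      if parent_id = "" ∨ PySem.Set.contains seen parent_id then ancestors
      else
        match PySem.Dict.get? (PySem.Dict.mk id_map) parent_id with
        | none => ancestors
        | some parent =>
          pvWalkAux id_map fuel (ancestors ++ [parent]) (PySem.Set.add seen parent_id) parent_id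

def pvWalkParentChain (msg_id : String) (id_map : List (String × List (String × String))) :
    List (List (String × String)) :=
  (pvWalkAux id_map (id_map.length + 1) [] (PySem.Set.ofList [msg_id]) msg_id).reverse

def format_history_for_classifier_py (messages : List (List (String × String))) (id_map : List (String × List (String × String))) : String × (List (String × String)) :=
  -- state: (seen, ordered_ids, ordered_entries)
  let st := messages.foldl (fun st msg =>
    let mid := PySem.Dict.getD (PySem.Dict.mk msg) "message_id" ""
    let st := (pvWalkParentChain mid id_map).foldl (fun st ancestor =>
      let aid := PySem.Dict.getD (PySem.Dict.mk ancestor) "message_id" ""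
      if aid ≠ "" ∧ PySem.Set.contains st.1 aid = false then
        (PySem.Set.add st.1 aid, st.2.1 ++ [aid], st.2.2 ++ [ancestor])
      else st) st
    if mid ≠ "" ∧ PySem.Set.contains st.1 mid = false then
      (PySem.Set.add st.1 mid, st.2.1 ++ [mid], st.2.2 ++ [msg])
    else st) ((PySem.Set.empty : PySem.Set String), ([] : List String), ([] : List (List (String × String))))
  let fin := (PySem.List.enumerate (st.2.1.zip st.2.2) 1).foldl (fun acc p =>
    let seq_id := PySem.Int.toStr p.1
    (PySem.Dict.insert acc.1 seq_id p.2.1,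
     acc.2 ++ ["[" ++ seq_id ++ "] Q: " ++ PySem.Dict.getD (PySem.Dict.mk p.2.2) "question" ""
               ++ "\nA: " ++ PySem.Dict.getD (PySem.Dict.mk p.2.2) "answer" ""]))
    ((PySem.Dict.empty : PySem.Dict String String), ([] : List String))
  (PySem.Str.join "\n---\n" fin.2, fin.1.items)

-- ===== PORT B =====
-- Source B's emit tail of visit: g = entry.get("message_id",""); if g and g not in ordered: ordered[g] = entry
def pvEmit (ordered : PySem.Dict String (List (String × String))) (entry : List (String × String)) :
    PySem.Dict String (List (String × String)) :=
  let g := PySem.Dict.getD (PySem.Dict.mk entry) "message_id" ""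
  if g ≠ "" ∧ PySem.Dict.contains ordered g = false then PySem.Dict.insert ordered g entry else ordered

-- Source B's recursive visit; the fuel (id_map.length + 1) only bounds the recursion depth,
-- which the `seen` guard already bounds by the number of distinct keys of id_map.
def pvVisit (id_map : List (String × List (String × String))) :
    Nat → String → List (String × String) → PySem.Set String →
    PySem.Dict String (List (String × String)) → PySem.Dict String (List (String × String))
  | 0, _, entry, _, ordered => pvEmit ordered entry
  | fuel+1, cid, entry, seen, ordered =>
    let ordered' :=
      match PySem.Dict.get? (PySem.Dict.mk id_map) cid with
      | none => ordered
      | some node =>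
        let pid := PySem.Dict.getD (PySem.Dict.mk node) "parent_query_id" ""
        if pid = "" ∨ PySem.Set.contains seen pid then ordered
        else
          match PySem.Dict.get? (PySem.Dict.mk id_map) pid with
          | none => ordered
          | some parent => pvVisit id_map fuel pid parent (PySem.Set.add seen pid) ordered
    pvEmit ordered' entry

def format_history_for_classifier_py_alt (messages : List (List (String × String))) (id_map : List (String × List (String × String))) : String × (List (String × String)) :=
  let ordered := messages.foldl (fun ordered msg =>
    let mid := PySem.Dict.getD (PySem.Dict.mk msg) "message_id" ""
    pvVisit id_map (id_map.length + 1) mid msg (PySem.Set.ofList [mid]) ordered)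
    (PySem.Dict.empty : PySem.Dict String (List (String × String)))
  let fin := (PySem.List.enumerate ordered.items 1).foldl (fun acc p =>
    let seq_id := PySem.Int.toStr p.1
    (PySem.Dict.insert acc.1 seq_id p.2.1,
     acc.2 ++ ["[" ++ seq_id ++ "] Q: " ++ PySem.Dict.getD (PySem.Dict.mk p.2.2) "question" ""
               ++ "\nA: " ++ PySem.Dict.getD (PySem.Dict.mk p.2.2) "answer" ""]))
    ((PySem.Dict.empty : PySem.Dict String String), ([] : List String))
  (PySem.Str.join "\n---\n" fin.2, fin.1.items)

-- ===== PRECONDITION & SPEC =====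
def Spec_format_history_for_classifier_py (messages : List (List (String × String))) (id_map : List (String × List (String × String))) (out : String × (List (String × String))) : Prop := out = format_history_for_classifier_py_alt messages id_map
instance (messages : List (List (String × String))) (id_map : List (String × List (String × String))) (out : String × (List (String × String))) : Decidable (Spec_format_history_for_classifier_py messages id_map out) := by unfold Spec_format_history_for_classifier_py; infer_instance

-- ===== CLAIM (what is proved, stated in full; the proofs are below) =====
def Claim_equal_format_history_for_classifier_py : Prop := ∀ (messages : List (List (String × String))) (id_map : List (String × List (String × String))), Dom_format_history_for_classifier_py messages id_map → Spec_format_history_for_classifier_py messages id_map (format_history_for_classifier_py messages id_map)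

-- ===== LEMMAS AND PROOFS =====

-- A's per-entry emission step on the triple (seen, ordered_ids, ordered_entries)
def pvStepA (st : PySem.Set String × List String × List (List (String × String)))
    (e : List (String × String)) :
    PySem.Set String × List String × List (List (String × String)) :=
  let g := PySem.Dict.getD (PySem.Dict.mk e) "message_id" ""
  if g ≠ "" ∧ PySem.Set.contains st.1 g = false then
    (PySem.Set.add st.1 g, st.2.1 ++ [g], st.2.2 ++ [e])
  else st

-- correspondence between A's triple and B's single dict
def pvRel (st : PySem.Set String × List String × List (List (String × String)))
    (d : PySem.Dict String (List (String × String))) : Prop :=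
  st.2.1 = d.items.map Prod.fst ∧ st.2.2 = d.items.map Prod.snd ∧
    ∀ g, PySem.Set.contains st.1 g = PySem.Dict.contains d g

theorem pvWalkAux_acc (id_map : List (String × List (String × String))) :
    ∀ (fuel : Nat) (anc : List (List (String × String))) (seen : PySem.Set String) (cid : String),
      pvWalkAux id_map fuel anc seen cid = anc ++ pvWalkAux id_map fuel [] seen cid := by
  intro fuel
  induction fuel with
  | zero => intro anc seen cid; simp [pvWalkAux]
  | succ f ih =>
    intro anc seen cid
    simp only [pvWalkAux]
    cases h1 : PySem.Dict.get? (PySem.Dict.mk id_map) cid with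
    | none => simp
    | some current =>
      dsimp only
      split
      · simp
      · cases h2 : PySem.Dict.get? (PySem.Dict.mk id_map) (PySem.Dict.getD (PySem.Dict.mk current) "parent_query_id" "") with
        | none => simp
        | some parent =>
          dsimp only
          rw [ih (anc ++ [parent]), ih ([] ++ [parent])]
          simp

-- B's visit equals A's walk (root-first) followed by per-entry emission
theorem pvVisit_eq_walk (id_map : List (String × List (String × String))) :
    ∀ (fuel : Nat) (cid : String) (entry : List (String × String)) (seen : PySem.Set String)
      (d : PySem.Dict String (List (String × String))),
      pvVisit id_map fuel cid entry seen d
        = pvEmit ((pvWalkAux id_map fuel [] seen cid).reverse.foldl pvEmit d) entry := by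
  intro fuel
  induction fuel with
  | zero => intro cid entry seen d; simp [pvVisit, pvWalkAux]
  | succ f ih =>
    intro cid entry seen d
    simp only [pvVisit, pvWalkAux]
    cases h1 : PySem.Dict.get? (PySem.Dict.mk id_map) cid with
    | none => simp
    | some current =>
      dsimp only
      split
      · simp
      · cases h2 : PySem.Dict.get? (PySem.Dict.mk id_map) (PySem.Dict.getD (PySem.Dict.mk current) "parent_query_id" "") with
        | none => simp
        | some parent =>
          dsimp only
          rw [ih, pvWalkAux_acc id_map f ([] ++ [parent])]
          simp [List.foldl_append]

theorem pvRel_step (st : PySem.Set String × List String × List (List (String × String)))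
    (d : PySem.Dict String (List (String × String))) (e : List (String × String))
    (h : pvRel st d) : pvRel (pvStepA st e) (pvEmit d e) := by
  obtain ⟨h1, h2, h3⟩ := h
  simp only [pvStepA, pvEmit]
  rw [h3]
  split
  · rename_i hc
    refine ⟨?_, ?_, ?_⟩
    · rw [PySem.Dict.items_insert_of_not_contains _ _ hc.2]
      simp [h1]
    · rw [PySem.Dict.items_insert_of_not_contains _ _ hc.2]
      simp [h2]
    · intro x
      have h3' := h3 x
      simp only [PySem.Set.contains] at h3'
      rw [PySem.Dict.contains_insert]
      have h3'' : decide (x ∈ st.1) = PySem.Dict.contains d x := by simpa using h3'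
      simp [PySem.Set.contains, PySem.Set.mem_add, h3'', Bool.or_comm, beq_eq_decide]
  · exact ⟨h1, h2, h3⟩

theorem pvRel_foldl (l : List (List (String × String)))
    (st : PySem.Set String × List String × List (List (String × String)))
    (d : PySem.Dict String (List (String × String)))
    (h : pvRel st d) : pvRel (l.foldl pvStepA st) (l.foldl pvEmit d) := by
  induction l generalizing st d with
  | nil => exact h
  | cons x xs ih => exact ih _ _ (pvRel_step _ _ _ h)

-- the two message-level folds stay related
theorem pvRel_msgs (id_map : List (String × List (String × String))) :
    ∀ (msgs : List (List (String × String)))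
      (st : PySem.Set String × List String × List (List (String × String)))
      (d : PySem.Dict String (List (String × String))), pvRel st d →
    pvRel (msgs.foldl (fun st msg =>
      let mid := PySem.Dict.getD (PySem.Dict.mk msg) "message_id" ""
      let st := (pvWalkParentChain mid id_map).foldl (fun st ancestor =>
        let aid := PySem.Dict.getD (PySem.Dict.mk ancestor) "message_id" ""
        if aid ≠ "" ∧ PySem.Set.contains st.1 aid = false then
          (PySem.Set.add st.1 aid, st.2.1 ++ [aid], st.2.2 ++ [ancestor])
        else st) st
      if mid ≠ "" ∧ PySem.Set.contains st.1 mid = false then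
        (PySem.Set.add st.1 mid, st.2.1 ++ [mid], st.2.2 ++ [msg])
      else st) st)
    (msgs.foldl (fun ordered msg =>
      let mid := PySem.Dict.getD (PySem.Dict.mk msg) "message_id" ""
      pvVisit id_map (id_map.length + 1) mid msg (PySem.Set.ofList [mid]) ordered) d) := by
  intro msgs
  induction msgs with
  | nil => intro st d h; exact h
  | cons m ms ih =>
    intro st d h
    simp only [List.foldl_cons]
    apply ih
    rw [pvVisit_eq_walk]
    exact pvRel_step _ _ _ (pvRel_foldl _ _ _ h)

theorem pv_main (messages : List (List (String × String))) (id_map : List (String × List (String × String))) :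
    format_history_for_classifier_py messages id_map = format_history_for_classifier_py_alt messages id_map := by
  obtain ⟨h1, h2, h3⟩ := pvRel_msgs id_map messages
    ((PySem.Set.empty : PySem.Set String), ([] : List String), ([] : List (List (String × String))))
    (PySem.Dict.empty : PySem.Dict String (List (String × String)))
    ⟨rfl, rfl, by intro g; simp [PySem.Set.contains, PySem.Set.empty, PySem.Dict.contains, PySem.Dict.empty]⟩
  simp only [format_history_for_classifier_py, format_history_for_classifier_py_alt]
  rw [h1, h2, show ∀ (l : List (String × List (String × String))),
    (l.map Prod.fst).zip (l.map Prod.snd) = l from fun l => Eq.symm (List.zip_of_prod rfl rfl)]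

-- ===== VERDICT (by name: the statement is the Claim_ definition above) =====
theorem format_history_for_classifier_py_spec : Claim_equal_format_history_for_classifier_py := by
  intro messages id_map _
  exact pv_main messages id_map
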